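-- pv_equiv track=rewrite | github.com/ekaterinavasenkova/PM-24-6 | lab3/main.py | ne
-- ===== SOURCE A (Python) =====
-- def ne(table1, table2):
--     """Сравнивает значения в первой таблице с значениями во второй на не равно."""
--     if table1.keys() != table2.keys():
--         raise ValueError("Таблицы должны иметь одинаковые ключи (названия столбцов).")
--     bool_list = []
--     for i in range(len(list(table1.values())[0])):
--         row_ne = all(table1[key][i] != table2[key][i] for key in table1.keys())
--         bool_list.append(row_ne)
--     return bool_list
-- ===== SOURCE B (Python) =====
-- def ne(table1, table2):
--     """Сравнивает значения в первой таблице с значениями во второй на не равно."""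
--     if table1.keys() != table2.keys():
--         raise ValueError("Таблицы должны иметь одинаковые ключи (названия столбцов).")
--     n = len(list(table1.values())[0])
--     equal_rows = set()
--     for key, col1 in table1.items():
--         col2 = table2[key]
--         equal_rows.update(i for i in range(n) if col1[i] == col2[i])
--     return [i not in equal_rows for i in range(n)]
-- ===== Notes on version B (the rewrite author's own statement) =====
-- stated objective: alternative
-- what changed: A answers each row by a per-row all() of inequalities across the keys; B instead builds a set of 'bad' row indices (union over the columns of the indices where the two columns agree) and returns the complement membership test over range(n) - a set-union/complement formulation instead of per-row conjunction.
import Mathlib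
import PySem

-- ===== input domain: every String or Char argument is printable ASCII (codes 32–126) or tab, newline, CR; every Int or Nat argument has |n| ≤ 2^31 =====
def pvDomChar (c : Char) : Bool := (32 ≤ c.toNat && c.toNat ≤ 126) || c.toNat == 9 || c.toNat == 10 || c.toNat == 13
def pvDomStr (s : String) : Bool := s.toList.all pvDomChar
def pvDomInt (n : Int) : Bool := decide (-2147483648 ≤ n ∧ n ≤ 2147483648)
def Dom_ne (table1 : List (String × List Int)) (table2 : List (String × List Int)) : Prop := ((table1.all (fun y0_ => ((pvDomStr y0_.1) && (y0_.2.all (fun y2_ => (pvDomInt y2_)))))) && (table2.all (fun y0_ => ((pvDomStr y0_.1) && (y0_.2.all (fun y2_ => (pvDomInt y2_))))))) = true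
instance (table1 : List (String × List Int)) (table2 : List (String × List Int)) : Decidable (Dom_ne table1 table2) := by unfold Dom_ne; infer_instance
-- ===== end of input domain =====

-- B replaces A's per-row all() over the keys by a set of equal row indices: it unions, column by
-- column, the indices where the two columns agree, and returns the complement membership test over
-- range(n) (objective: alternative; same asymptotic cost).

-- ===== PORT A =====
-- A's dicts are the PySem.Dict built from the association lists. The keys-equality ValueError and
-- the IndexError on an empty dict / too-short column are excluded by Pre_ne; inside Pre_ne every
-- index read is in range, so getD with a default is exact there.
def ne (table1 : List (String × List Int)) (table2 : List (String × List Int)) : List Bool :=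
  let d1 := PySem.Dict.ofList table1
  let d2 := PySem.Dict.ofList table2
  -- for i in range(len(list(table1.values())[0])): bool_list.append(all(...))
  (List.range (d1.values.headD []).length).foldl
    (fun bool_list i =>
      bool_list ++ [d1.keys.all (fun key => !((d1.getD key []).getD i 0 == (d2.getD key []).getD i 0))])
    []

-- ===== PORT B =====
def ne_alt (table1 : List (String × List Int)) (table2 : List (String × List Int)) : List Bool :=
  let d1 := PySem.Dict.ofList table1
  let d2 := PySem.Dict.ofList table2
  let n := (d1.values.headD []).length
  -- equal_rows = set(); for key, col1 in table1.items(): equal_rows.update(i for i in range(n) if col1[i] == col2[i])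
  let equalRows : PySem.Set Nat :=
    d1.items.foldl
      (fun s kv =>
        PySem.Set.update s
          ((List.range n).filter (fun i => kv.2.getD i 0 == (d2.getD kv.1 []).getD i 0)))
      PySem.Set.empty
  -- [i not in equal_rows for i in range(n)]
  (List.range n).map (fun i => !(PySem.Set.contains equalRows i))

-- ===== PRECONDITION & SPEC =====
-- Pre_ne holds exactly where the Python returns: the two dicts have the same key set (else
-- ValueError), the first dict is non-empty (else IndexError on list(values())[0]) and every column
-- of both dicts has at least as many entries as the first column (else IndexError at some index).
def Pre_ne (table1 : List (String × List Int)) (table2 : List (String × List Int)) : Prop :=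
  let d1 := PySem.Dict.ofList table1
  let d2 := PySem.Dict.ofList table2
  d1.items ≠ [] ∧
  (∀ k ∈ d1.keys, k ∈ d2.keys) ∧ (∀ k ∈ d2.keys, k ∈ d1.keys) ∧
  (∀ kv ∈ d1.items, (d1.values.headD []).length ≤ kv.2.length) ∧
  (∀ kv ∈ d2.items, (d1.values.headD []).length ≤ kv.2.length)
instance (table1 : List (String × List Int)) (table2 : List (String × List Int)) : Decidable (Pre_ne table1 table2) := by unfold Pre_ne; infer_instance

def pvWitness_ne : (List (String × List Int)) × (List (String × List Int)) :=
  ([("x", [1, 2]), ("y", [3, 4])], [("y", [3, 9]), ("x", [5, 2])])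

def Spec_ne (table1 : List (String × List Int)) (table2 : List (String × List Int)) (out : List Bool) : Prop := out = ne_alt table1 table2
instance (table1 : List (String × List Int)) (table2 : List (String × List Int)) (out : List Bool) : Decidable (Spec_ne table1 table2 out) := by unfold Spec_ne; infer_instance

-- ===== CLAIM (what is proved, stated in full; the proofs are below) =====
def Claim_equal_ne : Prop := ∀ (table1 : List (String × List Int)) (table2 : List (String × List Int)), Dom_ne table1 table2 → Pre_ne table1 table2 → Spec_ne table1 table2 (ne table1 table2)

-- ===== LEMMAS AND PROOFS =====

-- Membership in the accumulated set of B's update-loop: i is in it iff it was in the start set or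
-- some processed item puts it there.
theorem mem_ne_fold (items : List (String × List Int)) (f : String × List Int → Nat → Bool)
    (n : Nat) (s : PySem.Set Nat) (i : Nat) :
    (i ∈ items.foldl (fun s kv => PySem.Set.update s ((List.range n).filter (f kv))) s)
      ↔ i ∈ s ∨ ∃ kv ∈ items, i < n ∧ f kv i = true := by
  induction items generalizing s with
  | nil => simp
  | cons kv items ih =>
      simp only [List.foldl_cons, ih, PySem.Set.mem_update, List.mem_filter, List.mem_range]
      constructor
      · rintro (⟨h | h⟩ | h)
        · exact Or.inl h
        · exact Or.inr ⟨kv, by simp, h.1, h.2⟩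
        · obtain ⟨kv', h1, h2⟩ := h
          exact Or.inr ⟨kv', by simp [h1], h2⟩
      · rintro (h | ⟨kv', h1, h2⟩)
        · exact Or.inl (Or.inl h)
        · rcases List.mem_cons.mp h1 with h1 | h1
          · exact Or.inl (Or.inr (h1 ▸ h2))
          · exact Or.inr ⟨kv', h1, h2⟩

-- B's row answer equals A's per-row all() over the keys.
theorem ne_row (table1 table2 : List (String × List Int)) (n i : Nat) (hi : i < n) :
    (!(PySem.Set.contains
        ((PySem.Dict.ofList table1).items.foldl
          (fun s kv =>
            PySem.Set.update s
              ((List.range n).filter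
                (fun j => kv.2.getD j 0 == ((PySem.Dict.ofList table2).getD kv.1 []).getD j 0)))
          PySem.Set.empty) i))
      = (PySem.Dict.ofList table1).keys.all
          (fun key => !(((PySem.Dict.ofList table1).getD key []).getD i 0
              == ((PySem.Dict.ofList table2).getD key []).getD i 0)) := by
  rw [PySem.Set.contains_eq_decide, Bool.eq_iff_iff]
  simp only [Bool.not_eq_eq_eq_not, Bool.not_true, decide_eq_false_iff_not,
      mem_ne_fold, List.all_eq_true, Bool.not_eq_eq_eq_not, Bool.not_true, beq_eq_false_iff_ne]
  constructor
  · intro h key hkey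
    obtain ⟨v, hv⟩ : ∃ v, (key, v) ∈ (PySem.Dict.ofList table1).items := by
      simp only [PySem.Dict.keys, List.mem_map] at hkey
      obtain ⟨kv, hkv, hk⟩ := hkey
      exact ⟨kv.2, by simpa [← hk] using hkv⟩
    have hg : (PySem.Dict.ofList table1).getD key [] = v :=
      PySem.Dict.getD_of_mem_items _ hv (PySem.Dict.nodup_keys_ofList table1) []
    intro heq
    exact h (Or.inr ⟨(key, v), hv, hi, by rw [← hg]; simp only [List.getD] at heq; simp [heq]⟩)
  · rintro h (h' | ⟨kv, hkv, _, heq⟩)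
    · simp [PySem.Set.empty] at h'
    · have hk : kv.1 ∈ (PySem.Dict.ofList table1).keys :=
        PySem.Dict.mem_keys_of_mem_items _ hkv
      have hg : (PySem.Dict.ofList table1).getD kv.1 [] = kv.2 :=
        PySem.Dict.getD_of_mem_items _ hkv (PySem.Dict.nodup_keys_ofList table1) []
      exact h kv.1 hk (by rw [hg]; exact of_decide_eq_true (by simpa using heq))

-- ===== VERDICT (by name: the statement is the Claim_ definition above) =====
theorem ne_spec : Claim_equal_ne := by
  intro table1 table2 _ _
  unfold Spec_ne ne ne_alt
  simp only
  rw [PySem.List.foldl_append_singleton_eq_map]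
  apply List.ext_getElem
  · simp
  · intro j hj hj'
    have hjn : j < (((PySem.Dict.ofList table1).values.headD []).length) := by simpa using hj
    simp only [List.nil_append, List.getElem_map, List.getElem_range]
    exact (ne_row table1 table2 _ j hjn).symm
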